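-- pv_equiv track=rewrite | github.com/heladiofog/CodeSignalPython | FundamentalCodingInterviewPrep/04_Python_Coding_Practice_for_Technical_Interviews/01_Exploring_Index-Based_Traversals/00_Jumping_Between_Arrays.py | solution
-- ===== SOURCE A (Python) =====
-- def solution(arrayA, arrayB):
--   # TODO: Implement the function
--   indexA = 1
--   indexB = None
--   in_arrayA = True
--   output = []
--
--   while True:
--     if in_arrayA:
--       if arrayA[indexA - 1] == 0:  # visited
--         return output
--       indexB = arrayA[indexA - 1]
--       arrayA[indexA - 1] = 0  # visited
--     else:
--       output.append(indexB)
--       indexA = arrayB[indexB - 1]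
--
--     in_arrayA = not in_arrayA
--   pass
-- ===== SOURCE B (Python) =====
-- def solution(arrayA, arrayB):
--     n = len(arrayA)
--     # Phase 1: record up to n+1 hops of the jump chain; a zero value ends it.
--     # n+1 hops always suffice: the chain can visit at most n distinct cells
--     # before it must land on one it has already used.
--     chain = []
--     p = 1
--     for _ in range(n + 1):
--         v = arrayA[p - 1]
--         if v == 0:
--             break
--         chain.append(p)
--         p = arrayB[v - 1]
--     # Phase 2: cut the recorded chain at the first revisited position and
--     # read off the values.
--     seen = set()
--     out = []
--     for p in chain:
--         if p in seen:
--             break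
--         seen.add(p)
--         out.append(arrayA[p - 1])
--     return out
-- ===== Notes on version B (the rewrite author's own statement) =====
-- stated objective: alternative
-- what changed: Replaces A's online marking state machine (an in_arrayA toggle that zeroes arrayA cells in place to detect revisits) by two staged passes: record a bounded prefix of the jump chain (at most len(arrayA)+1 hops, enough by pigeonhole), then cut it at the first revisited position; Pre_ restricts to the natural domain where every stored jump index is a valid 1-based index (or a 0 'visited' mark), excluding inputs where A raises IndexError or returns via Python's accidental negative-index wraparound.
-- outside the precondition, e.g. on solution([1], [0]): A returns [1], B returns [1, 1]; on solution([-1], [1, -2]): A returns [-1], B returns [-1]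
import Mathlib
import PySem

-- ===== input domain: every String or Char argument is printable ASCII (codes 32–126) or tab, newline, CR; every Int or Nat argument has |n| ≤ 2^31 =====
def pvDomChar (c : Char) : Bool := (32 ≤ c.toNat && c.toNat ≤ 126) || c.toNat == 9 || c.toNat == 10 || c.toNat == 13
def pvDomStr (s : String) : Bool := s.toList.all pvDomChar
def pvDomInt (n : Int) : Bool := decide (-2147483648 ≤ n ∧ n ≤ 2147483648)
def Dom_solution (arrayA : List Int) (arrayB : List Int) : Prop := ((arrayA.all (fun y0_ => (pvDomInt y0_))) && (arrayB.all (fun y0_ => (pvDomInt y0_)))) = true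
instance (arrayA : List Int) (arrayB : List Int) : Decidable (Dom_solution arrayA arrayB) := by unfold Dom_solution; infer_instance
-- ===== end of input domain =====

-- B replaces A's online marking state machine (zeroing arrayA in place under an
-- in_arrayA toggle) by two staged passes: record a bounded prefix of the jump chain,
-- then cut it at the first revisited position.  Equivalence is about the RETURN
-- value only: A mutates its arrayA argument in place, B does not.

-- ===== PORT A =====
-- A's `while True` with the in_arrayA toggle, ported with fuel; each fuel unit is one
-- iteration of the Python while loop.  Within Pre_ a run makes at most arrayA.length
-- reads of arrayA before stopping (each non-final read zeroes a fresh cell), hence at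
-- most 2*arrayA.length + 2 iterations; the fuel-out value and the `none` index
-- branches (= IndexError) are only reached outside Pre_.
def solLoopA (fuel : Nat) (arrA : List Int) (arrB : List Int) (indexA : Int)
    (indexB : Option Int) (output : List Int) (inA : Bool) : List Int :=
  match fuel with
  | 0 => output
  | Nat.succ f =>
    if inA then
      match PySem.List.pyGet? arrA (indexA - 1) with
      | none => output      -- IndexError (excluded by Pre_)
      | some v =>
        if v = 0 then output  -- visited: return output
        else solLoopA f (PySem.List.pySetD arrA (indexA - 1) 0) arrB indexA (some v) output false
    else
      match indexB with
      | none => output      -- unreachable: in_arrayA is False only after indexB was set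
      | some b =>
        let output' := output ++ [b]
        match PySem.List.pyGet? arrB (b - 1) with
        | none => output'   -- IndexError after the append (excluded by Pre_)
        | some nA => solLoopA f arrA arrB nA indexB output' true

def solution (arrayA : List Int) (arrayB : List Int) : List Int :=
  solLoopA (2 * arrayA.length + 2) arrayA arrayB 1 none [] true

-- ===== PORT B =====
-- Phase 1: record up to arrayA.length + 1 hops of the jump chain; a zero value ends it.
def chainLoop (fuel : Nat) (arrayA : List Int) (arrayB : List Int) (p : Int)
    (chain : List Int) : List Int :=
  match fuel with
  | 0 => chain
  | Nat.succ f =>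
    match PySem.List.pyGet? arrayA (p - 1) with
    | none => chain         -- IndexError (excluded by Pre_)
    | some v =>
      if v = 0 then chain
      else
        match PySem.List.pyGet? arrayB (v - 1) with
        | none => chain ++ [p]   -- IndexError after the append (excluded by Pre_)
        | some p' => chainLoop f arrayA arrayB p' (chain ++ [p])

-- Phase 2: cut the chain at the first revisited position and read off the values.
-- pyGetD is the total form of arrayA[p - 1]: every p in chain was read in phase 1.
def cutLoop (arrayA : List Int) (chain : List Int) (seen : PySem.Set Int)
    (out : List Int) : List Int :=
  match chain with
  | [] => out
  | p :: rest =>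
    if seen.contains p then out
    else cutLoop arrayA rest (seen.add p) (out ++ [PySem.List.pyGetD arrayA (p - 1) 0])

def solution_alt (arrayA : List Int) (arrayB : List Int) : List Int :=
  cutLoop arrayA (chainLoop (arrayA.length + 1) arrayA arrayB 1 []) PySem.Set.empty []

-- ===== PRECONDITION & SPEC =====
-- Pre_ restricts to the task's natural domain: every jump index stored in the arrays is
-- a valid 1-based index (or a 0 "visited" mark in arrayA); it also admits the boundary
-- cases where no jump is taken (arrayA starts with 0) or the very first hop already ends
-- the walk through valid positive indices.  Outside it A either raises IndexError or
-- follows Python's accidental negative-index wraparound (see claim cites).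
def Pre_solution (arrayA : List Int) (arrayB : List Int) : Prop :=
  arrayA ≠ [] ∧
    (arrayA.getD 0 0 = 0 ∨
      ((∀ x ∈ arrayA, x = 0 ∨ (1 ≤ x ∧ x ≤ (arrayB.length : Int))) ∧
       (∀ y ∈ arrayB, 1 ≤ y ∧ y ≤ (arrayA.length : Int))) ∨
      (1 ≤ arrayA.getD 0 0 ∧ arrayA.getD 0 0 ≤ (arrayB.length : Int) ∧
       1 ≤ arrayB.getD ((arrayA.getD 0 0).toNat - 1) 0 ∧
       arrayB.getD ((arrayA.getD 0 0).toNat - 1) 0 ≤ (arrayA.length : Int) ∧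
       (arrayA.getD ((arrayB.getD ((arrayA.getD 0 0).toNat - 1) 0).toNat - 1) 0 = 0 ∨
        arrayB.getD ((arrayA.getD 0 0).toNat - 1) 0 = 1)))
instance (arrayA : List Int) (arrayB : List Int) : Decidable (Pre_solution arrayA arrayB) := by
  unfold Pre_solution; infer_instance

def pvWitness_solution : List Int × List Int := ([2, 1], [2, 1])

def Spec_solution (arrayA : List Int) (arrayB : List Int) (out : List Int) : Prop := out = solution_alt arrayA arrayB
instance (arrayA : List Int) (arrayB : List Int) (out : List Int) : Decidable (Spec_solution arrayA arrayB out) := by unfold Spec_solution; infer_instance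

-- ===== CLAIM (what is proved, stated in full; the proofs are below) =====
def Claim_equal_solution : Prop := ∀ (arrayA : List Int) (arrayB : List Int), Dom_solution arrayA arrayB → Pre_solution arrayA arrayB → Spec_solution arrayA arrayB (solution arrayA arrayB)

-- ===== LEMMAS AND PROOFS =====



-- The common reference walk both ports are reduced to: one full chain step per fuel
-- unit, visited positions kept in a set, the base array never written.
def refLoop (fuel : Nat) (base : List Int) (arrB : List Int) (p : Int)
    (seen : PySem.Set Int) (out : List Int) : List Int :=
  match fuel with
  | 0 => out
  | Nat.succ f =>
    match PySem.List.pyGet? base (p - 1) with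
    | none => out
    | some v =>
      if v = 0 ∨ seen.contains p then out
      else
        match PySem.List.pyGet? arrB (v - 1) with
        | none => out ++ [v]
        | some p' => refLoop f base arrB p' (seen.add p) (out ++ [v])

lemma pyGet?_of_one_based (L : List Int) (p : Int) (h1 : 1 ≤ p) (h2 : p ≤ (L.length : Int)) :
    PySem.List.pyGet? L (p - 1) = some (L[p.toNat - 1]'(by omega)) := by
  rw [PySem.List.pyGet?_of_nonneg L (by omega : (0:Int) ≤ p - 1),
    show (p - 1).toNat = p.toNat - 1 by omega]
  exact List.getElem?_eq_getElem (by omega)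

lemma contains_add_self (seen : PySem.Set Int) (p : Int) :
    (seen.add p).contains p = true :=
  (PySem.Set.contains_iff _ _).mpr ((PySem.Set.mem_add _ _ _).mpr (Or.inr rfl))

lemma contains_add_ne (seen : PySem.Set Int) (p q : Int) (hne : q ≠ p) :
    (seen.add p).contains q = seen.contains q := by
  by_cases hm : q ∈ seen
  · rw [(PySem.Set.contains_iff _ _).mpr ((PySem.Set.mem_add _ _ _).mpr (Or.inl hm)),
      (PySem.Set.contains_iff _ _).mpr hm]
  · have h1 : (seen.add p).contains q = false := by
      apply Bool.eq_false_iff.mpr; intro h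
      exact ((PySem.Set.mem_add _ _ _).mp ((PySem.Set.contains_iff _ _).mp h)).elim hm hne
    have h2 : seen.contains q = false := by
      apply Bool.eq_false_iff.mpr; intro h
      exact hm ((PySem.Set.contains_iff _ _).mp h)
    rw [h1, h2]

lemma contains_empty (x : Int) : (PySem.Set.empty : PySem.Set Int).contains x = false := by
  apply Bool.eq_false_iff.mpr; intro h
  have hm := (PySem.Set.contains_iff _ _).mp h
  simp [PySem.Set.empty] at hm

-- When the first hop already ends the walk (a zero cell or a jump straight back to
-- position 1), both ports return the singleton [arrayA[0]].
lemma step1_case (a : Int) (t arrB : List Int)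
    (h1 : 1 ≤ a) (h2 : a ≤ (arrB.length : Int))
    (hq1 : 1 ≤ arrB.getD (a.toNat - 1) 0)
    (hq2 : arrB.getD (a.toNat - 1) 0 ≤ ((a :: t).length : Int))
    (hterm : (a :: t).getD ((arrB.getD (a.toNat - 1) 0).toNat - 1) 0 = 0
      ∨ arrB.getD (a.toNat - 1) 0 = 1) :
    solution (a :: t) arrB = solution_alt (a :: t) arrB := by
  have ha0 : a ≠ 0 := by omega
  have hmB : a.toNat - 1 < arrB.length := by omega
  obtain ⟨q, hq_def⟩ : ∃ q, q = arrB.getD (a.toNat - 1) 0 := ⟨_, rfl⟩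
  rw [← hq_def] at hq1 hq2 hterm
  have hq2' : q ≤ (t.length : Int) + 1 := by
    rw [List.length_cons] at hq2; exact_mod_cast hq2
  have hga0 : PySem.List.pyGet? (a :: t) (1 - 1) = some a := by
    rw [PySem.List.pyGet?_of_nonneg _ (by omega : (0:Int) ≤ 1 - 1)]; rfl
  have hq : PySem.List.pyGet? arrB (a - 1) = some q := by
    rw [pyGet?_of_one_based arrB a h1 h2, hq_def]
    congr 1
    simp [List.getD_eq_getElem?_getD, List.getElem?_eq_getElem hmB]
  have hset : PySem.List.pySetD (a :: t) (1 - 1) 0 = (0 : Int) :: t := by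
    rw [PySem.List.pySetD_of_nonneg _ _ (by omega : (0:Int) ≤ 1 - 1)]; rfl
  unfold solution solution_alt
  rw [show 2 * ((a : Int) :: t).length + 2 = Nat.succ (Nat.succ (Nat.succ (2 * t.length + 1))) by
      rw [List.length_cons]; omega,
    show ((a : Int) :: t).length + 1 = Nat.succ (Nat.succ t.length) by rw [List.length_cons]]
  rcases hterm with hz | hq1'
  · -- a zero cell ends the walk after the first hop
    have hqne : q ≠ 1 := by
      intro e
      rw [e] at hz
      simp only [Int.toNat_one, Nat.sub_self, List.getD_cons_zero] at hz
      omega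
    have hkq : q.toNat - 1 < (a :: t).length := by rw [List.length_cons]; omega
    have h0v : (a :: t)[q.toNat - 1]'hkq = 0 := by
      rw [List.getD_eq_getElem?_getD, List.getElem?_eq_getElem hkq] at hz
      simpa using hz
    have hcellA : PySem.List.pyGet? (a :: t) (q - 1) = some 0 := by
      rw [pyGet?_of_one_based _ _ hq1 hq2, h0v]
    obtain ⟨jj, hjj⟩ : ∃ jj, q.toNat - 1 = jj + 1 := ⟨q.toNat - 2, by omega⟩
    have hkq0 : q.toNat - 1 < ((0 : Int) :: t).length := by rw [List.length_cons]; omega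
    have h0v' : ((0 : Int) :: t)[q.toNat - 1]'hkq0 = 0 := by
      have e1 : ((0 : Int) :: t)[q.toNat - 1]? = t[jj]? := by
        rw [hjj]; exact List.getElem?_cons_succ
      have e2 : ((a : Int) :: t)[q.toNat - 1]? = t[jj]? := by
        rw [hjj]; exact List.getElem?_cons_succ
      have h3 := List.getElem?_eq_getElem hkq0
      have h4 := List.getElem?_eq_getElem hkq
      rw [e2, h0v] at h4
      rw [e1] at h3
      exact (Option.some.inj (h4.symm.trans h3)).symm
    have hcell0 : PySem.List.pyGet? ((0 : Int) :: t) (q - 1) = some 0 := by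
      rw [pyGet?_of_one_based _ _ hq1 (by rw [List.length_cons]; omega), h0v']
    simp only [solLoopA, chainLoop, hga0, if_neg ha0, hq, hset, hcellA, hcell0,
      List.nil_append]
    simp [cutLoop]
  · -- a jump straight back to position 1
    have hchain1 : ∀ (f : Nat) (acc : List Int),
        chainLoop f (a :: t) arrB 1 acc = acc ++ List.replicate f (1 : Int) := by
      intro f
      induction f with
      | zero => intro acc; simp [chainLoop]
      | succ f ihf =>
        intro acc
        simp only [chainLoop, hga0, if_neg ha0, hq, hq1']
        rw [ihf]
        simp [List.replicate_succ]
    have hcell0 : PySem.List.pyGet? ((0 : Int) :: t) ((1 : Int) - 1) = some 0 := by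
      rw [PySem.List.pyGet?_of_nonneg _ (by omega : (0:Int) ≤ 1 - 1)]; rfl
    rw [show Nat.succ (Nat.succ t.length) = t.length + 2 from rfl, hchain1]
    subst hq1'
    simp only [solLoopA, hga0, if_neg ha0, hq, hset, hcell0, List.nil_append]
    simp [cutLoop, List.replicate_succ]

-- A's marking loop equals the reference walk, given that arrA is base with exactly the
-- seen cells zeroed and the chain stays inside 1-based bounds.
lemma loopA_eq_ref (arrB base : List Int)
    (hbase : ∀ x ∈ base, x = 0 ∨ (1 ≤ x ∧ x ≤ (arrB.length : Int)))
    (hB : ∀ y ∈ arrB, 1 ≤ y ∧ y ≤ (base.length : Int)) :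
    ∀ (f : Nat) (arrA : List Int) (seen : PySem.Set Int) (p : Int) (ib : Option Int)
      (out : List Int),
    arrA.length = base.length → 1 ≤ p → p ≤ (base.length : Int) →
    (∀ j : Nat, j < base.length →
        arrA[j]? = some (if seen.contains ((j : Int) + 1) then 0 else base.getD j 0)) →
    solLoopA (2 * f) arrA arrB p ib out true = refLoop f base arrB p seen out := by
  intro f
  induction f with
  | zero => intro arrA seen p ib out _ _ _ _; rfl
  | succ f ih =>
    intro arrA seen p ib out hlen hp1 hp2 hinv
    have hk : p.toNat - 1 < base.length := by omega
    have hkA : p.toNat - 1 < arrA.length := by omega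
    have hgb := pyGet?_of_one_based base p hp1 hp2
    have hga := pyGet?_of_one_based arrA p hp1 (by omega)
    have hkey : ((p.toNat - 1 : Nat) : Int) + 1 = p := by omega
    have hbgd : base.getD (p.toNat - 1) 0 = base[p.toNat - 1]'hk := by
      simp [List.getD_eq_getElem?_getD, List.getElem?_eq_getElem hk]
    have hAval : arrA[p.toNat - 1]'hkA
        = (if seen.contains p then 0 else base[p.toNat - 1]'hk) := by
      have h := hinv (p.toNat - 1) hk
      rw [List.getElem?_eq_getElem hkA, hkey, hbgd] at h
      exact Option.some.inj h
    rw [show 2 * Nat.succ f = Nat.succ (Nat.succ (2 * f)) by omega]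
    by_cases hc : seen.contains p = true
    · have hc' : p ∈ seen := (PySem.Set.contains_iff seen p).mp hc
      simp [solLoopA, refLoop, hga, hgb, hAval, hc']
    · rw [Bool.not_eq_true] at hc
      have hc' : p ∉ seen := by simpa using hc
      by_cases hz : base[p.toNat - 1]'hk = 0
      · simp [solLoopA, refLoop, hga, hgb, hAval, hc', hz]
      · obtain ⟨hv1, hv2⟩ := (hbase _ (List.getElem_mem hk)).resolve_left hz
        have hgB := pyGet?_of_one_based arrB _ hv1 hv2
        have hkb : (base[p.toNat - 1]'hk).toNat - 1 < arrB.length := by omega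
        obtain ⟨hq1, hq2⟩ := hB (arrB[(base[p.toNat - 1]'hk).toNat - 1]'hkb)
          (List.getElem_mem hkb)
        have hset : PySem.List.pySetD arrA (p - 1) 0 = arrA.set (p.toNat - 1) 0 := by
          rw [PySem.List.pySetD_of_nonneg arrA 0 (by omega : (0:Int) ≤ p - 1),
            show (p - 1).toNat = p.toNat - 1 by omega]
        have hinv' : ∀ j : Nat, j < base.length →
            (arrA.set (p.toNat - 1) 0)[j]?
              = some (if (seen.add p).contains ((j : Int) + 1) then 0 else base.getD j 0) := by
          intro j hj
          by_cases hjk : j = p.toNat - 1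
          · subst hjk
            rw [List.getElem?_set_self' ..]
            have : (arrA[p.toNat - 1]?).isSome := by
              rw [List.getElem?_eq_getElem hkA]; rfl
            rw [Option.isSome_iff_exists] at this
            obtain ⟨a, ha⟩ := this
            rw [ha, hkey, contains_add_self]
            rfl
          · have hne : ((j : Int) + 1) ≠ p := by omega
            rw [List.getElem?_set_ne (by omega), hinv j hj,
              contains_add_ne seen p _ hne]
        have hrec := ih (arrA.set (p.toNat - 1) 0) (seen.add p)
          (arrB[(base[p.toNat - 1]'hk).toNat - 1]'hkb) (some (base[p.toNat - 1]'hk))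
          (out ++ [base[p.toNat - 1]'hk]) (by simp [hlen]) hq1 hq2 hinv'
        simpa [solLoopA, refLoop, hga, hgb, hAval, hc', hz, hgB, hset] using hrec

-- the Python `chain` accumulator commutes with list append
lemma chainLoop_acc (arrA arrB : List Int) :
    ∀ (f : Nat) (p : Int) (acc : List Int),
    chainLoop f arrA arrB p acc = acc ++ chainLoop f arrA arrB p [] := by
  intro f
  induction f with
  | zero => intro p acc; simp [chainLoop]
  | succ f ih =>
    intro p acc
    rcases h : PySem.List.pyGet? arrA (p - 1) with _ | v
    · simp [chainLoop, h]
    · by_cases hz : v = 0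
      · simp [chainLoop, h, hz]
      · rcases hb : PySem.List.pyGet? arrB (v - 1) with _ | p'
        · simp [chainLoop, h, hz, hb]
        · simp only [chainLoop, h, hb, if_neg hz]
          rw [ih p' (acc ++ [p]), ih p' ([] ++ [p])]
          simp

-- B's two staged passes equal the reference walk with the same fuel.
lemma loopB_eq_ref (arrB base : List Int)
    (hbase : ∀ x ∈ base, x = 0 ∨ (1 ≤ x ∧ x ≤ (arrB.length : Int)))
    (hB : ∀ y ∈ arrB, 1 ≤ y ∧ y ≤ (base.length : Int)) :
    ∀ (f : Nat) (p : Int) (seen : PySem.Set Int) (out : List Int),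
    1 ≤ p → p ≤ (base.length : Int) →
    cutLoop base (chainLoop f base arrB p []) seen out = refLoop f base arrB p seen out := by
  intro f
  induction f with
  | zero => intro p seen out _ _; rfl
  | succ f ih =>
    intro p seen out hp1 hp2
    have hk : p.toNat - 1 < base.length := by omega
    have hgb := pyGet?_of_one_based base p hp1 hp2
    by_cases hz : base[p.toNat - 1]'hk = 0
    · simp [chainLoop, cutLoop, refLoop, hgb, hz]
    · obtain ⟨hv1, hv2⟩ := (hbase _ (List.getElem_mem hk)).resolve_left hz
      have hgB := pyGet?_of_one_based arrB _ hv1 hv2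
      have hkb : (base[p.toNat - 1]'hk).toNat - 1 < arrB.length := by omega
      obtain ⟨hq1, hq2⟩ := hB (arrB[(base[p.toNat - 1]'hk).toNat - 1]'hkb)
        (List.getElem_mem hkb)
      have hval : PySem.List.pyGetD base (p - 1) 0 = base[p.toNat - 1]'hk := by
        rw [PySem.List.pyGetD_eq_getElem base 0 (by omega) (by omega)]
        simp only [show (p - 1).toNat = p.toNat - 1 by omega]
      by_cases hc : seen.contains p = true
      · have hc' : p ∈ seen := (PySem.Set.contains_iff seen p).mp hc
        simp only [chainLoop, hgb, if_neg hz, hgB, List.nil_append]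
        rw [chainLoop_acc base arrB f]
        simp [cutLoop, refLoop, hgb, hc']
      · rw [Bool.not_eq_true] at hc
        have hc' : p ∉ seen := by simpa using hc
        have hrec := ih (arrB[(base[p.toNat - 1]'hk).toNat - 1]'hkb) (seen.add p)
          (out ++ [base[p.toNat - 1]'hk]) hq1 hq2
        simp only [chainLoop, hgb, if_neg hz, hgB, List.nil_append]
        rw [chainLoop_acc base arrB f]
        simp only [refLoop, hgb, hgB, List.singleton_append, cutLoop, hval]
        rw [if_neg (show ¬(base[p.toNat - 1]'hk = 0 ∨ seen.contains p = true) by simp [hz, hc']),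
          if_neg (show ¬(seen.contains p = true) by simp [hc'])]
        exact hrec

-- ===== VERDICT (by name: the statement is the Claim_ definition above) =====
theorem solution_spec : Claim_equal_solution := by
  intro arrayA arrayB _ hpre
  obtain ⟨hne, hcase⟩ := hpre
  unfold Spec_solution solution solution_alt
  rcases hcase with h0 | ⟨hbase, hB⟩ | hD2
  · cases arrayA with
    | nil => exact absurd rfl hne
    | cons a t =>
      have ha : a = 0 := by simpa [List.getD] using h0
      subst ha
      have hA1 : ∀ (f : Nat) (ib : Option Int) (out : List Int),
          solLoopA (Nat.succ f) ((0:Int) :: t) arrayB 1 ib out true = out := by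
        intro f ib out
        simp [solLoopA, PySem.List.pyGet?, PySem.List.pyIdx?]
      have hB1 : ∀ (f : Nat), chainLoop (Nat.succ f) ((0:Int) :: t) arrayB 1 [] = [] := by
        intro f
        simp [chainLoop, PySem.List.pyGet?, PySem.List.pyIdx?]
      rw [show 2 * ((0:Int) :: t).length + 2 = Nat.succ (2 * ((0:Int) :: t).length + 1) by omega,
          show ((0:Int) :: t).length + 1 = Nat.succ (((0:Int) :: t).length) by omega,
          hA1, hB1]
      rfl
  · have hlen : 1 ≤ arrayA.length := List.length_pos_iff.mpr hne
    have hinv0 : ∀ j : Nat, j < arrayA.length →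
        arrayA[j]? = some (if (PySem.Set.empty : PySem.Set Int).contains ((j : Int) + 1)
          then 0 else arrayA.getD j 0) := by
      intro j hj
      have hc0 := contains_empty ((j : Int) + 1)
      rw [hc0]
      simp [List.getD_eq_getElem?_getD, List.getElem?_eq_getElem hj]
    have e1 := loopA_eq_ref arrayB arrayA hbase hB (arrayA.length + 1) arrayA
      PySem.Set.empty 1 none [] rfl (by omega) (by exact_mod_cast hlen) hinv0
    have e2 := loopB_eq_ref arrayB arrayA hbase hB (arrayA.length + 1) 1
      PySem.Set.empty [] (by omega) (by exact_mod_cast hlen)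
    rw [show 2 * arrayA.length + 2 = 2 * (arrayA.length + 1) by ring, e1, ← e2]
  · cases arrayA with
    | nil => exact absurd rfl hne
    | cons a t =>
      obtain ⟨h1, h2, hq1, hq2, hterm⟩ := hD2
      simp only [List.getD_cons_zero] at h1 h2 hq1 hq2 hterm
      have := step1_case a t arrayB h1 h2 hq1 hq2 hterm
      unfold solution solution_alt at this
      exact this
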